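-- pv_equiv track=rewrite | github.com/Ericsson/PlantUML-Interactive-Editor | src/plantuml_gui/fork.py | findforkbounds
-- ===== SOURCE A (Python) =====
-- def findforkbounds(lines, count):
--     start_fork = -1
--     end_fork = -1
--     index = 0
--     level = 0
--     inside_fork = False
--
--     while index < len(lines):
--         line = lines[index]
--         clean_line = line.strip()
--
--         if clean_line == "fork":
--             if count == 1 and not inside_fork:
--                 start_fork = index
--                 inside_fork = True
--                 continue
--             count -= 1
--         if inside_fork and clean_line == "fork":
--             level += 1
--         if (
--             clean_line == "end fork" or clean_line == "end merge"
--         ):  # fork can end in both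
--             if inside_fork:
--                 level -= 1
--                 if level == 0:
--                     end_fork = index
--                     break
--             if (
--                 clean_line == "end fork"
--             ):  # if its an end merge there wasnt an extra count due to the rect.
--                 count -= 1
--         index += 1
--     return start_fork, end_fork
-- ===== SOURCE B (Python) =====
-- def findforkbounds(lines, count):
--     toks = [line.strip() for line in lines]
--     # Bracket-match every fork to its closing line with an explicit stack:
--     # "fork" opens, "end fork"/"end merge" closes the innermost open fork.
--     match = {}
--     stack = []
--     for i, s in enumerate(toks):
--         if s == "fork":
--             stack.append(i)
--         elif s == "end fork" or s == "end merge":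
--             if stack:
--                 match[stack.pop()] = i
--     # The requested block starts at the first "fork" line preceded by exactly
--     # count-1 marker lines ("fork" or "end fork"); its end is the precomputed match.
--     seen = 0
--     for i, s in enumerate(toks):
--         if s == "fork" and seen + 1 == count:
--             return i, match.get(i, -1)
--         if s == "fork" or s == "end fork":
--             seen += 1
--     return -1, -1
-- ===== Notes on version B (the rewrite author's own statement) =====
-- stated objective: alternative
-- what changed: Replaced A's single stateful while-loop (inside_fork flag, re-entry via continue, level counter) by global bracket matching: one stack pass records the closing line of EVERY fork in a dict, then a selection pass picks the count-th fork by a prefix count of marker lines and looks its end up in the dict; it trades A's single scan for a precomputed match table.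
import Mathlib
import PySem

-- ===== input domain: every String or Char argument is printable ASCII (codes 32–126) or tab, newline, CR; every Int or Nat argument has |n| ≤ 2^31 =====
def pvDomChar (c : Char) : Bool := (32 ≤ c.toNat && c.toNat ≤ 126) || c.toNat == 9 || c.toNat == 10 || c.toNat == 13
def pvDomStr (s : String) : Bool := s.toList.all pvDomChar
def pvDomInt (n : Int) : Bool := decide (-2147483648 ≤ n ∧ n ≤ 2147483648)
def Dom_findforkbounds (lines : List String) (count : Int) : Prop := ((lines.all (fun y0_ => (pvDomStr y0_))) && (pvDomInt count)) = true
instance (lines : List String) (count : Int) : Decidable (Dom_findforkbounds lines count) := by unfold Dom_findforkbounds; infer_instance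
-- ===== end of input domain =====

-- B replaces A's single stateful while-loop (inside_fork flag, continue re-entry, level
-- counter) by global bracket matching: a stack pass records every fork's closing line in a
-- dict, then a selection pass picks the count-th fork by prefix counting and looks its end up.


-- ===== PORT A =====
-- A's while-loop, transliterated: state (start_fork, end_fork, index, level, inside_fork, count).
-- The 'continue' branch re-enters the loop at the same index with inside_fork set; the loop
-- terminates because each index is visited at most twice (lexicographic measure below).
def findforkboundsLoop (lines : List String) (startF endF : Int) (index : Nat)
    (level : Int) (inside : Bool) (count : Int) : Int × Int :=
  if h : index < lines.length then
    let line := lines.getD index ""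
    let cleanLine := PySem.Str.strip line
    if cleanLine == "fork" ∧ count == 1 ∧ ¬inside then
      -- start_fork = index; inside_fork = True; continue
      findforkboundsLoop lines (index : Int) endF index level true count
    else
      let count1 := if cleanLine == "fork" then count - 1 else count
      let level1 := if inside ∧ cleanLine == "fork" then level + 1 else level
      if cleanLine == "end fork" ∨ cleanLine == "end merge" then
        if inside then
          let level2 := level1 - 1
          if level2 == 0 then
            (startF, (index : Int))  -- end_fork = index; break
          else
            let count2 := if cleanLine == "end fork" then count1 - 1 else count1
            findforkboundsLoop lines startF endF (index + 1) level2 inside count2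
        else
          let count2 := if cleanLine == "end fork" then count1 - 1 else count1
          findforkboundsLoop lines startF endF (index + 1) level1 inside count2
      else
        findforkboundsLoop lines startF endF (index + 1) level1 inside count1
  else
    (startF, endF)
termination_by (lines.length - index, if inside then 0 else 1)
decreasing_by
  all_goals first
    | (apply Prod.Lex.left; omega)
    | (apply Prod.Lex.right; simp_all)

def findforkbounds (lines : List String) (count : Int) : Int × Int :=
  findforkboundsLoop lines (-1) (-1) 0 0 false count

-- ===== PORT B =====
-- Pass 1 of Source B: bracket-match every fork to its closing line with an explicit stack.
-- Python's stack (list append/pop at the end) is represented head-as-top; pop = head.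
def fbMatch : List String → Nat → List Nat → PySem.Dict Int Int → PySem.Dict Int Int
  | [], _, _, d => d
  | s :: rest, i, st, d =>
    if s = "fork" then fbMatch rest (i + 1) (i :: st) d
    else if s = "end fork" ∨ s = "end merge" then
      match st with
      | [] => fbMatch rest (i + 1) [] d
      | top :: stTail => fbMatch rest (i + 1) stTail (d.insert (top : Int) (i : Int))
    else fbMatch rest (i + 1) st d

-- Pass 2 of Source B: pick the first "fork" preceded by exactly count-1 marker lines;
-- its end is match.get(i, -1).
def fbSelect : List String → Nat → Int → Int → PySem.Dict Int Int → Int × Int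
  | [], _, _, _, _ => (-1, -1)
  | s :: rest, i, seen, count, d =>
    if s = "fork" ∧ seen + 1 = count then ((i : Int), d.getD (i : Int) (-1))
    else if s = "fork" ∨ s = "end fork" then fbSelect rest (i + 1) (seen + 1) count d
    else fbSelect rest (i + 1) seen count d

def findforkbounds_alt (lines : List String) (count : Int) : Int × Int :=
  let toks := lines.map PySem.Str.strip
  fbSelect toks 0 0 count (fbMatch toks 0 [] PySem.Dict.empty)

-- ===== PRECONDITION & SPEC =====
def Spec_findforkbounds (lines : List String) (count : Int) (out : Int × Int) : Prop := out = findforkbounds_alt lines count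
instance (lines : List String) (count : Int) (out : Int × Int) : Decidable (Spec_findforkbounds lines count out) := by unfold Spec_findforkbounds; infer_instance

-- ===== CLAIM (what is proved, stated in full; the proofs are below) =====
def Claim_equal_findforkbounds : Prop := ∀ (lines : List String) (count : Int), Dom_findforkbounds lines count → Spec_findforkbounds lines count (findforkbounds lines count)

-- ===== LEMMAS AND PROOFS =====

-- Proof-internal level scan: first index ≥ j where the nesting level hits 0 (A's inside mode).
def fbPhase2 (toks : List String) (j : Nat) (level : Int) : Int :=
  if h : j < toks.length then
    let s := toks.getD j ""
    if s = "fork" then fbPhase2 toks (j + 1) (level + 1)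
    else if s = "end fork" ∨ s = "end merge" then
      if level - 1 = 0 then (j : Int)
      else fbPhase2 toks (j + 1) (level - 1)
    else fbPhase2 toks (j + 1) level
  else -1
termination_by toks.length - j

theorem getD_map_strip (lines : List String) (j : Nat) (h : j < lines.length) :
    (lines.map PySem.Str.strip)[j]?.getD "" = PySem.Str.strip (lines[j]?.getD "") := by
  simp [List.getElem?_map, List.getElem?_eq_getElem h]

-- Once inside the fork, A's loop = fbPhase2 on the stripped lines (count is dead state).
theorem loopA_inside (lines : List String) (m : Nat) :
    ∀ (j : Nat), lines.length - j = m → ∀ (startF level count : Int),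
    findforkboundsLoop lines startF (-1) j level true count =
      (startF, fbPhase2 (lines.map PySem.Str.strip) j level) := by
  induction m with
  | zero =>
    intro j hj startF level count
    have h : ¬ j < lines.length := by omega
    rw [findforkboundsLoop, fbPhase2]
    simp [h]
  | succ m ih =>
    intro j hj startF level count
    have h : j < lines.length := by omega
    have hm : j < (lines.map PySem.Str.strip).length := by simpa using h
    have h' : lines.length - (j + 1) = m := by omega
    rw [findforkboundsLoop, fbPhase2]
    simp only [h, hm, dif_pos, List.getD_eq_getElem?_getD, getD_map_strip lines j h]
    by_cases hf : PySem.Str.strip (lines[j]?.getD "") = "fork"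
    · simp [hf, ih (j + 1) h']
    · by_cases he : PySem.Str.strip (lines[j]?.getD "") = "end fork" ∨
          PySem.Str.strip (lines[j]?.getD "") = "end merge"
      · by_cases hl : level - 1 = 0
        · simp [hf, he, hl]
        · simp [hf, he, hl, ih (j + 1) h']
      · simp [hf, he, ih (j + 1) h']

-- Preservation: a key a not on the stack and below the scan index is never (re)inserted.
theorem fbMatch_getD_preserved (toks : List String) :
    ∀ (rest : List String) (j : Nat) (st : List Nat) (d : PySem.Dict Int Int) (a : Nat),
    rest = toks.drop j → (∀ x ∈ st, x ≠ a) → a < j →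
    (fbMatch rest j st d).getD (a : Int) (-1) = d.getD (a : Int) (-1) := by
  intro rest
  induction rest with
  | nil => intro j st d a _ _ _; simp only [fbMatch]
  | cons s rest ih =>
    intro j st d a hdrop hst ha
    have hrest : rest = toks.drop (j + 1) := by
      have := congrArg (List.drop 1) hdrop; simpa using this
    simp only [fbMatch]
    by_cases hf : s = "fork"
    · rw [if_pos hf]
      exact ih (j + 1) (j :: st) d a hrest
        (by intro x hx; simp at hx; rcases hx with rfl | hx; exacts [by omega, hst x hx]) (by omega)
    · rw [if_neg hf]
      by_cases he : s = "end fork" ∨ s = "end merge"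
      · rw [if_pos he]
        cases st with
        | nil => exact ih (j + 1) [] d a hrest (by simp) (by omega)
        | cons top stTail =>
          have htop : top ≠ a := hst top (by simp)
          show (fbMatch rest (j + 1) stTail (d.insert (top : Int) (j : Int))).getD _ _ = _
          rw [ih (j + 1) stTail _ a hrest (fun x hx => hst x (by simp [hx])) (by omega),
              PySem.Dict.getD_insert,
              if_neg (fun hh => htop (by exact_mod_cast hh.symm))]
      · rw [if_neg he]
        exact ih (j + 1) st d a hrest hst (by omega)

-- Depth lemma: a key a at depth |pre| on the stack gets matched at fbPhase2 j (|pre|+1).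
theorem fbMatch_depth (toks : List String) :
    ∀ (rest : List String) (j : Nat) (pre suf : List Nat) (d : PySem.Dict Int Int) (a : Nat),
    rest = toks.drop j → a < j → (∀ x ∈ pre, x ≠ a) → (∀ x ∈ suf, x ≠ a) →
    d.getD (a : Int) (-1) = -1 →
    (fbMatch rest j (pre ++ a :: suf) d).getD (a : Int) (-1) =
      fbPhase2 toks j ((pre.length : Int) + 1) := by
  intro rest
  induction rest with
  | nil =>
    intro j pre suf d a hdrop _ _ _ hd
    have hlen : toks.length ≤ j := by
      have := congrArg List.length hdrop; simp at this; omega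
    rw [fbPhase2]
    simp only [fbMatch]
    simp [show ¬ j < toks.length by omega, hd]
  | cons s rest ih =>
    intro j pre suf d a hdrop ha hpre hsuf hd
    have hj : j < toks.length := by
      have := congrArg List.length hdrop; simp at this; omega
    have hrest : rest = toks.drop (j + 1) := by
      have := congrArg (List.drop 1) hdrop; simpa using this
    have hs : toks.getD j "" = s := by
      have h0 : (toks.drop j)[0]? = some s := by rw [← hdrop]; simp
      rw [List.getElem?_drop, Nat.add_zero] at h0
      simp [List.getD_eq_getElem?_getD, h0]
    rw [fbPhase2]
    simp only [fbMatch, hj, dif_pos, hs]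
    by_cases hf : s = "fork"
    · rw [if_pos hf, if_pos hf]
      have := ih (j + 1) (j :: pre) suf d a hrest (by omega)
        (by intro x hx; simp at hx; rcases hx with rfl | hx; exacts [by omega, hpre x hx]) hsuf hd
      rw [show (j :: pre) ++ a :: suf = j :: (pre ++ a :: suf) by simp] at this
      rw [this, show (((j :: pre).length : Int) + 1) = ((pre.length : Int) + 1) + 1 by
        push_cast [List.length_cons]; ring]
    · rw [if_neg hf, if_neg hf]
      by_cases he : s = "end fork" ∨ s = "end merge"
      · rw [if_pos he, if_pos he]
        cases pre with
        | nil =>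
          -- a is the stack top: it is matched here, at index j; level 1 - 1 = 0
          rw [if_pos (by norm_num)]
          show (fbMatch rest (j + 1) suf (d.insert (a : Int) (j : Int))).getD _ _ = _
          rw [fbMatch_getD_preserved toks rest (j + 1) suf _ a hrest hsuf (by omega),
              PySem.Dict.getD_insert, if_pos rfl]
        | cons top pre' =>
          have htop : top ≠ a := hpre top (by simp)
          rw [if_neg (by push_cast [List.length_cons]; omega)]
          show (fbMatch rest (j + 1) (pre' ++ a :: suf) (d.insert (top : Int) (j : Int))).getD _ _ = _
          rw [ih (j + 1) pre' suf (d.insert (top : Int) (j : Int)) a hrest (by omega)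
            (fun x hx => hpre x (by simp [hx])) hsuf
            (by rw [PySem.Dict.getD_insert,
                    if_neg (fun hh => htop (by exact_mod_cast hh.symm))]
                exact hd)]
          rw [show ((((top :: pre').length : Int) + 1) - 1) = ((pre'.length : Int) + 1) by
            push_cast [List.length_cons]; ring]
      · rw [if_neg he, if_neg he]
        rw [ih (j + 1) pre suf d a hrest (by omega) hpre hsuf hd]

-- Running the matcher from j up to a "fork" line at index t: its entry is fbPhase2 (t+1) 1.
theorem fbMatch_run_to (toks : List String) (t : Nat) (ht : toks.getD t "" = "fork")
    (htl : t < toks.length) :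
    ∀ (rest : List String) (j : Nat) (st : List Nat) (d : PySem.Dict Int Int),
    rest = toks.drop j → j ≤ t → (∀ x ∈ st, x ≠ t) → d.getD (t : Int) (-1) = -1 →
    (fbMatch rest j st d).getD (t : Int) (-1) = fbPhase2 toks (t + 1) 1 := by
  intro rest
  induction rest with
  | nil =>
    intro j st d hdrop hjt _ _
    have := congrArg List.length hdrop; simp at this; omega
  | cons s rest ih =>
    intro j st d hdrop hjt hst hd
    have hrest : rest = toks.drop (j + 1) := by
      have := congrArg (List.drop 1) hdrop; simpa using this
    have hs : toks.getD j "" = s := by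
      have h0 : (toks.drop j)[0]? = some s := by rw [← hdrop]; simp
      rw [List.getElem?_drop, Nat.add_zero] at h0
      simp [List.getD_eq_getElem?_getD, h0]
    by_cases hjeq : j = t
    · -- at the fork line itself: push t, then the depth lemma with pre = []
      subst hjeq
      have hsf : s = "fork" := by rw [← hs, ht]
      simp only [fbMatch]
      rw [if_pos hsf]
      have := fbMatch_depth toks rest (j + 1) [] st d j hrest (by omega) (by simp) hst hd
      simpa using this
    · have hjt' : j + 1 ≤ t := by omega
      simp only [fbMatch]
      by_cases hf : s = "fork"
      · rw [if_pos hf]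
        exact ih (j + 1) (j :: st) d hrest hjt'
          (by intro x hx; simp at hx; rcases hx with rfl | hx; exacts [by omega, hst x hx]) hd
      · rw [if_neg hf]
        by_cases he : s = "end fork" ∨ s = "end merge"
        · rw [if_pos he]
          cases st with
          | nil => exact ih (j + 1) [] d hrest hjt' (by simp) hd
          | cons top stTail =>
            have htop : top ≠ t := hst top (by simp)
            show (fbMatch rest (j + 1) stTail (d.insert (top : Int) (j : Int))).getD _ _ = _
            exact ih (j + 1) stTail (d.insert (top : Int) (j : Int)) hrest hjt'
              (fun x hx => hst x (by simp [hx]))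
              (by rw [PySem.Dict.getD_insert,
                      if_neg (fun hh => htop (by exact_mod_cast hh.symm))]
                  exact hd)
        · rw [if_neg he]
          exact ih (j + 1) st d hrest hjt' hst hd

-- Shifting the 'seen' accumulator of the selection pass into the count.
theorem fbSelect_shift :
    ∀ (rest : List String) (i : Nat) (seen count : Int) (d : PySem.Dict Int Int),
    fbSelect rest i seen count d = fbSelect rest i 0 (count - seen) d := by
  intro rest
  induction rest with
  | nil => intro i seen count d; simp [fbSelect]
  | cons s rest ih =>
    intro i seen count d
    simp only [fbSelect]
    by_cases hf : s = "fork"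
    · by_cases h1 : seen + 1 = count
      · rw [if_pos ⟨hf, h1⟩, if_pos (show s = "fork" ∧ 0 + 1 = count - seen from ⟨hf, by omega⟩)]
      · rw [if_neg (show ¬(s = "fork" ∧ seen + 1 = count) from fun hh => h1 hh.2),
            if_neg (show ¬(s = "fork" ∧ 0 + 1 = count - seen) from
              fun hh => h1 (by have h2 := hh.2; omega)),
            if_pos (Or.inl hf), if_pos (Or.inl hf),
            ih (i + 1) (seen + 1) count d, ih (i + 1) (0 + 1) (count - seen) d]
        congr 1
        omega
    · rw [if_neg (show ¬(s = "fork" ∧ seen + 1 = count) from fun hh => hf hh.1),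
          if_neg (show ¬(s = "fork" ∧ 0 + 1 = count - seen) from fun hh => hf hh.1)]
      by_cases he : s = "end fork"
      · rw [if_pos (Or.inr he), if_pos (Or.inr he),
            ih (i + 1) (seen + 1) count d, ih (i + 1) (0 + 1) (count - seen) d]
        congr 1
        omega
      · have hno : ¬(s = "fork" ∨ s = "end fork") := by
          rintro (hh | hh); exacts [hf hh, he hh]
        rw [if_neg hno, if_neg hno]
        exact ih (i + 1) seen count d

-- A's loop before the fork is found = B's selection pass (with the full match table).
theorem loopA_select (lines : List String) :
    ∀ (rest : List String) (idx : Nat) (count : Int),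
    rest = lines.drop idx →
    findforkboundsLoop lines (-1) (-1) idx 0 false count =
      fbSelect ((lines.map PySem.Str.strip).drop idx) idx 0 count
        (fbMatch (lines.map PySem.Str.strip) 0 [] PySem.Dict.empty) := by
  intro rest
  induction rest with
  | nil =>
    intro idx count hdrop
    have hlen : lines.length ≤ idx := by
      have := congrArg List.length hdrop; simp at this; omega
    have hd2 : (lines.map PySem.Str.strip).drop idx = [] := by
      apply List.drop_eq_nil_of_le; simpa using hlen
    rw [findforkboundsLoop, hd2]
    simp [show ¬ idx < lines.length by omega, fbSelect]
  | cons l rest ih =>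
    intro idx count hdrop
    set toks := lines.map PySem.Str.strip with htoks
    have hlen := congrArg List.length hdrop
    simp at hlen
    have h : idx < lines.length := by omega
    have hget : lines.getD idx "" = l := by
      have h0 : (lines.drop idx)[0]? = some l := by rw [← hdrop]; simp
      rw [List.getElem?_drop, Nat.add_zero] at h0
      simp [List.getD_eq_getElem?_getD, h0]
    have hrest : rest = lines.drop (idx + 1) := by
      have := congrArg (List.drop 1) hdrop; simpa using this
    have hdt : toks.drop idx = PySem.Str.strip l :: toks.drop (idx + 1) := by
      rw [htoks, ← List.map_drop, ← List.map_drop, ← hdrop, ← hrest]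
      simp
    rw [findforkboundsLoop, hdt]
    simp only [h, dif_pos, hget, fbSelect]
    by_cases hf : PySem.Str.strip l = "fork"
    · by_cases hc : count = 1
      · -- A: continue with inside_fork; B: found, dict lookup = fbPhase2 via fbMatch_run_to
        subst hc
        have hidx : toks.getD idx "" = "fork" := by
          rw [htoks, List.getD_eq_getElem?_getD, getD_map_strip lines idx h,
              ← List.getD_eq_getElem?_getD, hget, hf]
        have hit : idx < toks.length := by simpa [htoks] using h
        have hrun := fbMatch_run_to toks idx hidx hit toks 0 []
          PySem.Dict.empty (by simp) (by omega) (by simp) (by simp)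
        have hstep : fbPhase2 toks idx 0 = fbPhase2 toks (idx + 1) (0 + 1) := by
          rw [fbPhase2]
          simp only [hit, dif_pos, hidx]
          simp
        rw [hf]
        rw [if_pos (by simp), if_pos (show ("fork" : String) = "fork" ∧ (0 : Int) + 1 = 1 by
              norm_num),
            loopA_inside lines (lines.length - idx) idx rfl, ← htoks, hstep, hrun]
        norm_num
      · have hA := ih (idx + 1) (count - 1) hrest
        rw [hf, fbSelect_shift]
        simp [hc, hA]
        intro h1
        exact absurd h1.symm hc
    · by_cases he : PySem.Str.strip l = "end fork"
      · have hA := ih (idx + 1) (count - 1) hrest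
        rw [he, fbSelect_shift]
        simp [hA]
      · by_cases hm : PySem.Str.strip l = "end merge"
        · have hA := ih (idx + 1) count hrest
          rw [hm]
          simp [hA]
        · have hA := ih (idx + 1) count hrest
          simp [hf, he, hm, hA]

-- ===== VERDICT (by name: the statement is the Claim_ definition above) =====
theorem findforkbounds_spec : Claim_equal_findforkbounds := by
  intro lines count _
  unfold Spec_findforkbounds findforkbounds findforkbounds_alt
  have := loopA_select lines lines 0 count (by simp)
  simpa using this
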